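-- pv_equiv track=rewrite | github.com/frapell/CDPedia | src/armado/sqlite_index.py | delta_decode
-- ===== SOURCE A (Python) =====
-- def delta_decode(ordered):
--     """Decode a compressed encoded bucket.
--
--     - ordered is a bytes object, representing a byte's array
--     - ctor is the final container
--     - append is the callable attribute used to add an element into the ctor
--     """
--     result = []
--     add_to_result = result.append
--
--     prev_doc = doc = shift = 0
--
--     for b in ordered:
--         doc |= (b & 0x7F) << shift
--         shift += 7
--
--         if not (b & 0x80):
--             # the sequence ended
--             prev_doc += doc
--             add_to_result(prev_doc)
--             doc = shift = 0
--
--     return result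
-- ===== SOURCE B (Python) =====
-- def delta_decode(ordered):
--     """Decode a compressed encoded bucket: decode varints to deltas, then prefix-sum."""
--     deltas = []
--     doc = shift = 0
--     for b in ordered:
--         doc |= (b & 0x7F) << shift
--         if not (b & 0x80):
--             deltas.append(doc)
--             doc = shift = 0
--         else:
--             shift += 7
--     result = []
--     total = 0
--     for d in deltas:
--         total += d
--         result.append(total)
--     return result
-- ===== Notes on version B (the rewrite author's own statement) =====
-- stated objective: alternative
-- what changed: Splits A's fused decode-and-accumulate loop into two passes: one pass decoding complete varints into a list of deltas, then a separate prefix-sum pass producing the absolute doc ids.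
import Mathlib
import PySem

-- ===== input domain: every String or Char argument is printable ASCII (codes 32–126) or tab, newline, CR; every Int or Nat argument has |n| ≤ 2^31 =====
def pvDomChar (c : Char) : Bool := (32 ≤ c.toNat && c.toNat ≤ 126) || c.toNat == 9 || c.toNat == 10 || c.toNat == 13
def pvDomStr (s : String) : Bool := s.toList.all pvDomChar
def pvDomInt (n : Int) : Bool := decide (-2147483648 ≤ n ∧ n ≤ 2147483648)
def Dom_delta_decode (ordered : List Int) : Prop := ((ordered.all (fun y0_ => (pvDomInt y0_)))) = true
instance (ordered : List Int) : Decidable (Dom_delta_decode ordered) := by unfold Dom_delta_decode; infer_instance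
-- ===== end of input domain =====

-- B splits A's fused decode-and-accumulate loop into a varint-decode pass plus a prefix-sum pass (alternative decomposition, same cost).


-- ===== PORT A =====
-- state: (result, prev_doc, doc, shift), exactly A's loop variables
def pvStepA (st : List Int × Int × Int × Nat) (b : Int) : List Int × Int × Int × Nat :=
  let doc := PySem.Int.bor st.2.2.1 ((PySem.Int.band b 0x7F) <<< st.2.2.2)
  let shift := st.2.2.2 + 7
  if PySem.Int.band b 0x80 = 0 then
    (st.1 ++ [st.2.1 + doc], st.2.1 + doc, 0, 0)
  else
    (st.1, st.2.1, doc, shift)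

def delta_decode (ordered : List Int) : List Int :=
  (ordered.foldl pvStepA ([], 0, 0, 0)).1

-- ===== PORT B =====
-- pass 1 state: (deltas, doc, shift)
def pvStepB (st : List Int × Int × Nat) (b : Int) : List Int × Int × Nat :=
  let doc := PySem.Int.bor st.2.1 ((PySem.Int.band b 0x7F) <<< st.2.2)
  if PySem.Int.band b 0x80 = 0 then
    (st.1 ++ [doc], 0, 0)
  else
    (st.1, doc, st.2.2 + 7)

-- pass 2: running prefix sum (total, result accumulator)
def pvAccum (deltas : List Int) (total : Int) : List Int :=
  match deltas with
  | [] => []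
  | d :: ds => (total + d) :: pvAccum ds (total + d)

def delta_decode_alt (ordered : List Int) : List Int :=
  pvAccum (ordered.foldl pvStepB ([], 0, 0)).1 0

-- ===== PRECONDITION & SPEC =====
def Spec_delta_decode (ordered : List Int) (out : List Int) : Prop := out = delta_decode_alt ordered
instance (ordered : List Int) (out : List Int) : Decidable (Spec_delta_decode ordered out) := by unfold Spec_delta_decode; infer_instance

-- ===== CLAIM (what is proved, stated in full; the proofs are below) =====
def Claim_equal_delta_decode : Prop := ∀ (ordered : List Int), Dom_delta_decode ordered → Spec_delta_decode ordered (delta_decode ordered)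

-- ===== LEMMAS AND PROOFS =====
-- the decode fold only appends to its delta list; the other components ignore it
theorem pvStepB_prefix (l : List Int) (ds : List Int) (doc : Int) (shift : Nat) :
    (l.foldl pvStepB (ds, doc, shift)).1 = ds ++ (l.foldl pvStepB ([], doc, shift)).1 := by
  induction l generalizing ds doc shift with
  | nil => simp
  | cons b l ih =>
    simp only [List.foldl_cons, pvStepB]
    split_ifs with h
    · simp only [List.nil_append]
      rw [ih, ih [_]]; simp
    · exact ih ..

-- main invariant: A's fused fold equals deltas-then-accumulate from any state
theorem pvMain (l : List Int) (res : List Int) (prev doc : Int) (shift : Nat) :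
    (l.foldl pvStepA (res, prev, doc, shift)).1 =
      res ++ pvAccum (l.foldl pvStepB ([], doc, shift)).1 prev := by
  induction l generalizing res prev doc shift with
  | nil => simp [pvAccum]
  | cons b l ih =>
    simp only [List.foldl_cons, pvStepA, pvStepB]
    split_ifs with h
    · simp only [List.nil_append]
      rw [ih, pvStepB_prefix l [_]]
      simp [pvAccum]
    · exact ih ..

-- ===== VERDICT (by name: the statement is the Claim_ definition above) =====
theorem delta_decode_spec : Claim_equal_delta_decode := by
  intro ordered _
  unfold Spec_delta_decode delta_decode delta_decode_alt
  simpa using pvMain ordered [] 0 0 0
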